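-- pv_equiv track=rewrite | github.com/mamrhein/identifiers | src/identifiers/euvatid.py | check_es_prof
-- ===== SOURCE A (Python) =====
-- from itertools import chain
-- from typing import Callable, Dict, Match, Optional, Pattern, Tuple
--
-- def check_es_prof(base: str, add: Optional[str] = None) -> str:
--     """Check country specific VAT-Id"""
--     s1 = sum(chain(*(divmod(2 * int(c), 10) for c in base[1::2])))
--     s2 = sum((int(c) for c in base[2::2]))
--     r = (s1 + s2) % 10
--     if r == 0:
--         return '0'
--     else:
--         return str(10 - r)
-- ===== SOURCE B (Python) =====
-- def check_es_prof(base: str, add=None) -> str: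
--     """Check country specific VAT-Id (single pass with a doubling toggle
--     instead of two separate slice passes)."""
--     total = 0
--     double = True
--     for c in base[1:]:
--         d = int(c)
--         if double:
--             d *= 2
--             if d > 9:
--                 d -= 9
--         total += d
--         double = not double
--     r = total % 10
--     return '0' if r == 0 else str(10 - r)
-- ===== Notes on version B (the rewrite author's own statement) =====
-- stated objective: idiomatic
-- what changed: Replaces the two independent stride-2 slice comprehensions (with divmod digit-summing) by one single pass over base[1:] carrying a running total and a doubling toggle, using d*2-9 when the doubled digit exceeds 9 instead of divmod.
import Mathlib
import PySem

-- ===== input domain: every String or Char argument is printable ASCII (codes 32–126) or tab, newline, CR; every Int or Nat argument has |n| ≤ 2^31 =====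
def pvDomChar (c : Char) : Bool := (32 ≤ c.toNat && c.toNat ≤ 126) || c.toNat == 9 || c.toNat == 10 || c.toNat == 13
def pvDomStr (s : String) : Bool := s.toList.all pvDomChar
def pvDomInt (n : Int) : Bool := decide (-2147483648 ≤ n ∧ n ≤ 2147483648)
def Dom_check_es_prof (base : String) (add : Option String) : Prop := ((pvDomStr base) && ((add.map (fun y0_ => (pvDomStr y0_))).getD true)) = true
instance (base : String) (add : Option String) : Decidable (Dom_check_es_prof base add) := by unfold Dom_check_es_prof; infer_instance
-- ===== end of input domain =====

-- B replaces A's two stride-2 slice comprehensions by one pass over base[1:] with a doubling toggle (objective: idiomatic single loop).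

-- ===== PORT A =====
-- int(c) for one character: PySem.Int.ofChars? is none exactly where Python raises ValueError;
-- Pre_ excludes those inputs, so the .getD 0 default is never the value claimed about.
def pvVal (c : Char) : Int := (PySem.Int.ofChars? [c]).getD 0

-- divmod(2*int(c), 10) as the two-element list it contributes to the chain (divisor 10 ≠ 0, so never none)
def pvPairA (c : Char) : List Int :=
  let p := (PySem.Int.divmod? (2 * pvVal c) 10).getD (0, 0)
  [p.1, p.2]

def check_es_prof (base : String) (_add : Option String) : String :=
  let l := base.toList
  -- s1 = sum(chain(*(divmod(2*int(c), 10) for c in base[1::2]))): flatten the divmod pairs, then sum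
  let s1 := (((PySem.List.slice? l (some 1) none 2).getD []).flatMap pvPairA).sum
  -- s2 = sum(int(c) for c in base[2::2])
  let s2 := (((PySem.List.slice? l (some 2) none 2).getD []).map pvVal).sum
  let r := PySem.Int.mod (s1 + s2) 10
  if r = 0 then "0" else PySem.Int.toStr (10 - r)

-- ===== PORT B =====
-- one step of B's loop body: state = (total, double-flag)
def pvStepB (st : Int × Bool) (c : Char) : Int × Bool :=
  let d := pvVal c
  let d := if st.2 then (let d2 := 2 * d; if d2 > 9 then d2 - 9 else d2) else d
  (st.1 + d, !st.2)

def check_es_prof_alt (base : String) (_add : Option String) : String :=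
  let t := PySem.List.slice base.toList (some 1) none   -- base[1:]
  let fin := t.foldl pvStepB (0, true)
  let r := PySem.Int.mod fin.1 10
  if r = 0 then "0" else PySem.Int.toStr (10 - r)

-- ===== PRECONDITION & SPEC =====
-- Pre_ excludes exactly the inputs on which Python's int(c) raises ValueError: a non-digit
-- character at some index ≥ 1 (the character at index 0 is never converted by either program).
def Pre_check_es_prof (base : String) (add : Option String) : Prop :=
  (base.toList.drop 1).all Char.isDigit = true
instance (base : String) (add : Option String) : Decidable (Pre_check_es_prof base add) := by
  unfold Pre_check_es_prof; infer_instance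

def pvWitness_check_es_prof : String × Option String := ("X427", none)

def Spec_check_es_prof (base : String) (add : Option String) (out : String) : Prop := out = check_es_prof_alt base add
instance (base : String) (add : Option String) (out : String) : Decidable (Spec_check_es_prof base add out) := by unfold Spec_check_es_prof; infer_instance

-- ===== CLAIM (what is proved, stated in full; the proofs are below) =====
def Claim_equal_check_es_prof : Prop := ∀ (base : String) (add : Option String), Dom_check_es_prof base add → Pre_check_es_prof base add → Spec_check_es_prof base add (check_es_prof base add)

-- ===== LEMMAS AND PROOFS =====

-- the elements at even indices 0, 2, 4, …
def pvEvens : List Char → List Char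
  | [] => []
  | [a] => [a]
  | a :: _ :: r => a :: pvEvens r

lemma pvEvens_cons (a : Char) (r : List Char) : pvEvens (a :: r) = a :: pvEvens r.tail := by
  cases r <;> rfl

-- the value one digit contributes to A's s1 (both components of the divmod pair summed)
def pvDblA (c : Char) : Int :=
  let p := (PySem.Int.divmod? (2 * pvVal c) 10).getD (0, 0)
  p.1 + p.2

lemma sum_flatMap_pvPairA (l : List Char) :
    (l.flatMap pvPairA).sum = (l.map pvDblA).sum := by
  induction l with
  | nil => rfl
  | cons c r ih => simp [pvPairA, pvDblA, ih]; ring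

-- B's alternating sum over a list, starting with the given doubling flag
def pvS : Bool → List Char → Int
  | _, [] => 0
  | true, c :: r => (let d2 := 2 * pvVal c; if d2 > 9 then d2 - 9 else d2) + pvS false r
  | false, c :: r => pvVal c + pvS true r

lemma pvFold_inv (t : List Char) : ∀ (acc : Int) (flag : Bool),
    (t.foldl pvStepB (acc, flag)).1 = acc + pvS flag t := by
  induction t with
  | nil => intro acc flag; simp [pvS]
  | cons c r ih =>
    intro acc flag
    cases flag <;> simp [List.foldl_cons, pvStepB, pvS, ih] <;> ring

-- on a digit, doubling-then-subtracting-9 equals the divmod digit sum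
lemma pvDbl_eq (c : Char) (h : c.isDigit = true) :
    pvDblA c = (let d2 := 2 * pvVal c; if d2 > 9 then d2 - 9 else d2) := by
  have hb : 48 ≤ c.toNat ∧ c.toNat ≤ 57 := by
    simp [Char.isDigit, UInt32.le_iff_toNat_le] at h; exact h
  have hc := Char.ofNat_toNat c
  have h10 : c.toNat = 48 ∨ c.toNat = 49 ∨ c.toNat = 50 ∨ c.toNat = 51 ∨ c.toNat = 52 ∨
      c.toNat = 53 ∨ c.toNat = 54 ∨ c.toNat = 55 ∨ c.toNat = 56 ∨ c.toNat = 57 := by omega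
  rcases h10 with h'|h'|h'|h'|h'|h'|h'|h'|h'|h' <;> rw [h'] at hc <;> rw [← hc] <;> decide

lemma pvS_eq (t : List Char) (h : ∀ c ∈ t, c.isDigit = true) :
    pvS true t = ((pvEvens t).map pvDblA).sum + ((pvEvens t.tail).map pvVal).sum ∧
    pvS false t = ((pvEvens t).map pvVal).sum + ((pvEvens t.tail).map pvDblA).sum := by
  induction t with
  | nil => simp [pvS, pvEvens]
  | cons c r ih =>
    have hc : c.isDigit = true := h c (by simp)
    have ihr := ih (fun x hx => h x (by simp [hx]))
    constructor
    · rw [pvEvens_cons]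
      simp only [pvS, List.tail_cons, List.map_cons, List.sum_cons]
      rw [ihr.2, ← pvDbl_eq c hc]; ring
    · rw [pvEvens_cons]
      simp only [pvS, List.tail_cons, List.map_cons, List.sum_cons]
      rw [ihr.1]; ring

-- [ys[2k] for k in range(⌈len/2⌉)] collects exactly the even-indexed elements
lemma pvCore (ys : List Char) :
    List.filterMap (fun k => ys[2*k]?) (List.range ((ys.length + 1)/2)) = pvEvens ys := by
  match ys with
  | [] => rfl
  | [a] => simp [pvEvens]
  | a :: b :: r =>
    have ih := pvCore r
    rw [show ((a :: b :: r).length + 1)/2 = (r.length + 1)/2 + 1 by simp [List.length]; omega]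
    rw [List.range_succ_eq_map, List.filterMap_cons]
    simp only [List.filterMap_map]
    have hf : ((fun k => (a :: b :: r)[2*k]?) ∘ Nat.succ) = (fun k => r[2*k]?) := by
      funext k
      show (a :: b :: r)[2 * (k+1)]? = r[2*k]?
      rw [show 2 * (k+1) = (2*k) + 1 + 1 by omega]
      simp
    rw [hf, ih]
    simp [pvEvens]

-- base[1::2] = the even-indexed elements of the tail
lemma pvSlice_odd (xs : List Char) :
    PySem.List.slice? xs (some 1) none 2 = some (pvEvens xs.tail) := by
  cases xs with
  | nil => rfl
  | cons a r =>
    simp only [PySem.List.slice?, PySem.List.sliceIndices]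
    simp only [Int.reduceLT, Int.reduceEq, ite_true, ite_false]
    have h1 : min (1:Int) ((a :: r).length : Int) = 1 := by simp
    rw [h1]
    rw [show (if (1:Int) < (((a :: r).length : Nat) : Int) then
        (((((a :: r).length : Nat) : Int) - 1 + 2 - 1)/2).toNat else 0) = (r.length + 1)/2 by
      simp only [List.length_cons]; split_ifs with h <;> omega]
    have hf : (fun x : Nat => (a :: r)[((1:Int) + 2*(x:Int)).toNat]?) = (fun x => r[2*x]?) := by
      funext x
      rw [show ((1:Int) + 2*(x:Int)).toNat = (2*x) + 1 by omega]
      simp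
    rw [hf, pvCore]
    simp

-- base[2::2] = the even-indexed elements of tail.tail
lemma pvSlice_even (xs : List Char) :
    PySem.List.slice? xs (some 2) none 2 = some (pvEvens xs.tail.tail) := by
  match xs with
  | [] => rfl
  | [a] => rfl
  | a :: b :: r =>
    simp only [PySem.List.slice?, PySem.List.sliceIndices]
    simp only [Int.reduceLT, Int.reduceEq, ite_true, ite_false]
    have h1 : min (2:Int) ((a :: b :: r).length : Int) = 2 := by simp [List.length]; omega
    rw [h1]
    rw [show (if (2:Int) < (((a :: b :: r).length : Nat) : Int) then
        (((((a :: b :: r).length : Nat) : Int) - 2 + 2 - 1)/2).toNat else 0) = (r.length + 1)/2 by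
      simp only [List.length_cons]; split_ifs with h <;> omega]
    have hf : (fun x : Nat => (a :: b :: r)[((2:Int) + 2*(x:Int)).toNat]?) = (fun x => r[2*x]?) := by
      funext x
      rw [show ((2:Int) + 2*(x:Int)).toNat = (2*x) + 1 + 1 by omega]
      simp
    rw [hf, pvCore]
    simp

-- ===== VERDICT (by name: the statement is the Claim_ definition above) =====
theorem check_es_prof_spec : Claim_equal_check_es_prof := by
  intro base add _ hpre
  unfold Spec_check_es_prof check_es_prof check_es_prof_alt
  simp only [pvSlice_odd, pvSlice_even, PySem.List.slice_from_one, Option.getD_some,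
    sum_flatMap_pvPairA, pvFold_inv]
  have hd : ∀ c ∈ base.toList.tail, c.isDigit = true := by
    intro c hc
    have h := hpre
    unfold Pre_check_es_prof at h
    rw [List.all_eq_true] at h
    exact h c (by rwa [List.drop_one])
  rw [(pvS_eq base.toList.tail hd).1]
  ring_nf
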